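-- pv_equiv track=rewrite | github.com/JonathanDLTran/Flashcard | lexer.py | match_variable
-- ===== SOURCE A (Python) =====
-- ALPHABETICAL = "abcdefghijklmnopqrstuvwxyzABCDEFGHIJKLMNOPQRSTUVWXYZ"
--
-- NUMERICAL = "0123456789"
--
-- UNDERSCORE = "_"
--
-- variable_chars = [
--     ALPHABETICAL,
--     NUMERICAL,
--     UNDERSCORE,
-- ]
--
-- VARIABLE_NOT_START_NUMERIC = True
--
-- VARIABLE = "variable"
--
-- def match_variable(string, idx, var_chars=variable_chars):
--     """
--     match_variable(str, idx, var_chars, var_rules) checks if the str beginnign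
--     at idx is a variable and returns the variable name and the lenght if the variable
--     based on the character rules allowed for a variable name in var_chars
--
--     Returns (var_name, len) if possible, else (None, 0)
--     Returns (None, 0) if string does not being with a variable allowed char, like udnerscore or
--     alphabetical
--     """
--     def match_variable_helper(string, idx, var_chars, name, length):
--         # check is there remaining string to process
--         if idx >= len(string):
--             return (name, length)
--
--         first = string[idx]
--
--         # check var_chars
--         correct_char = False
--         for var_str in var_chars:
--             if first in var_str:
--                 correct_char = True
--                 break
--         if not correct_char:
--             return (name, length)
--
--         return match_variable_helper(string, idx + 1, var_chars, name + first, length + 1)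
--
--     # check if the first character could be variable:
--     if (string[idx] not in UNDERSCORE) and (string[idx] not in ALPHABETICAL):
--         return (None, 0)
--
--     v, l = match_variable_helper(string, idx, var_chars, "", 0)
--
--     # no match
--     if l == 0:
--         return (None, 0)
--
--     # variable cannot start with numeric
--     if VARIABLE_NOT_START_NUMERIC and v[0] in NUMERICAL:
--         return (None, 0)
--
--     return ((VARIABLE, v), l)
-- ===== SOURCE B (Python) =====
-- ALPHABETICAL = "abcdefghijklmnopqrstuvwxyzABCDEFGHIJKLMNOPQRSTUVWXYZ"
-- NUMERICAL = "0123456789"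
-- UNDERSCORE = "_"
-- variable_chars = [ALPHABETICAL, NUMERICAL, UNDERSCORE]
-- VARIABLE_NOT_START_NUMERIC = True
-- VARIABLE = "variable"
--
-- def match_variable(string, idx, var_chars=variable_chars):
--     first = string[idx]
--     if first not in UNDERSCORE and first not in ALPHABETICAL:
--         return (None, 0)
--     allowed = "".join(var_chars)
--     name = []
--     for ch in string[idx:]:
--         if ch not in allowed:
--             break
--         name.append(ch)
--     if not name:
--         return (None, 0)
--     if name[0] in NUMERICAL:
--         return (None, 0)
--     return ((VARIABLE, "".join(name)), len(name))
-- ===== Notes on version B (the rewrite author's own statement) =====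
-- stated objective: simpler
-- what changed: Replaces the tail-recursive accumulator helper (index arithmetic with a length counter and an inner loop over var_chars) by slicing string[idx:] and a single for-each take-while scan over that slice against one joined allowed-character string, taking the length from the collected name.
-- intended difference: For negative idx where the whole suffix string[idx:] consists of var_chars characters and string[0] is a var_chars character (and string[idx] starts like a variable), A's helper walks past the negative indices into index 0 and re-reads the string from the front, returning a name with wrapped-around duplicated characters (e.g. 'bab' of length 3 for ('ab', -1)), while B returns just the matched suffix ('b', length 1), which is the intended meaning of matching at position idx. — e.g. on match_variable("ab", -1, ["ab"]): A returns (some ("variable", "bab"), 3), B returns (some ("variable", "b"), 1)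
import Mathlib
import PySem

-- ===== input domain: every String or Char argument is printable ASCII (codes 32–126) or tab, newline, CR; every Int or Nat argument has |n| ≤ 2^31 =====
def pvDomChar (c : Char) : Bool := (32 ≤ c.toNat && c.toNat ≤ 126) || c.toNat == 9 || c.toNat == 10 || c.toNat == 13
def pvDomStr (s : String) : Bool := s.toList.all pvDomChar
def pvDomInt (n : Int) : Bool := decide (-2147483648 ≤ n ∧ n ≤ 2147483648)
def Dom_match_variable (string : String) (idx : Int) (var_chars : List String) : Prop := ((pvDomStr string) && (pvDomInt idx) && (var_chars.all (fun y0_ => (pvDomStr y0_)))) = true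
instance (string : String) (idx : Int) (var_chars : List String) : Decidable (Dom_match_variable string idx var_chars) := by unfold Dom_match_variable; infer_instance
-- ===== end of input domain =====

-- B slices string[idx:] and take-while-scans that slice against one joined allowed string,
-- instead of A's index-walking tail recursion; objective: simpler. On negative idx where A
-- wraps past the end back to index 0, B returns the plain suffix match (see D_ below).

-- ===== PORT A =====
def pvALPHABETICAL : List Char := "abcdefghijklmnopqrstuvwxyzABCDEFGHIJKLMNOPQRSTUVWXYZ".toList
def pvNUMERICAL : List Char := "0123456789".toList
def pvUNDERSCORE : List Char := "_".toList

-- A's inner helper: tail recursion accumulating (name, length)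
def matchVariableHelper (s : List Char) (idx : Int) (var_chars : List String)
    (name : List Char) (length : Int) : List Char × Int :=
  if h : idx ≥ (s.length : Int) then (name, length)
  else
    match PySem.List.pyGet? s idx with
    | none => (name, length)  -- Python raises IndexError here (idx < -len); outside Pre_
    | some first =>
      -- for var_str in var_chars: if first in var_str: correct_char = True; break
      if var_chars.any (fun vs => vs.toList.contains first) then
        matchVariableHelper s (idx + 1) var_chars (name ++ [first]) (length + 1)
      else (name, length)
termination_by ((s.length : Int) - idx).toNat
decreasing_by simp at h; omega

def match_variable (string : String) (idx : Int) (var_chars : List String) : (Option (String × String)) × Int :=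
  let s := string.toList
  match PySem.List.pyGet? s idx with
  | none => (none, 0)  -- string[idx] raises IndexError; outside Pre_
  | some c0 =>
    if pvUNDERSCORE.contains c0 = false ∧ pvALPHABETICAL.contains c0 = false then (none, 0)
    else
      let vl := matchVariableHelper s idx var_chars [] 0
      if vl.2 = 0 then (none, 0)
      else
        match PySem.List.pyGet? vl.1 0 with
        | none => (none, 0)  -- v[0] would raise; unreachable since l ≠ 0
        | some v0 =>
          if pvNUMERICAL.contains v0 then (none, 0)
          else (some ("variable", String.ofList vl.1), vl.2)

-- ===== PORT B =====
-- for ch in string[idx:]: if ch not in allowed: break; name.append(ch)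
def takeAllowed (allowed : List Char) : List Char → List Char
  | [] => []
  | c :: rest => if allowed.contains c then c :: takeAllowed allowed rest else []

def match_variable_alt (string : String) (idx : Int) (var_chars : List String) : (Option (String × String)) × Int :=
  let s := string.toList
  match PySem.List.pyGet? s idx with
  | none => (none, 0)  -- string[idx] raises IndexError; outside Pre_
  | some first =>
    if pvUNDERSCORE.contains first || pvALPHABETICAL.contains first then
      let allowed := var_chars.flatMap String.toList  -- "".join(var_chars)
      let name := takeAllowed allowed (PySem.List.slice s (some idx) none)  -- string[idx:]
      match name with
      | [] => (none, 0)
      | n0 :: _ =>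
        if pvNUMERICAL.contains n0 then (none, 0)
        else (some ("variable", String.ofList name), (name.length : Int))
    else (none, 0)

-- ===== PRECONDITION & SPEC =====
-- Pre_ excludes exactly the inputs where Python A raises IndexError (string[idx] out of range).
def Pre_match_variable (string : String) (idx : Int) (var_chars : List String) : Prop :=
  -(string.toList.length : Int) ≤ idx ∧ idx < string.toList.length
instance (string : String) (idx : Int) (var_chars : List String) : Decidable (Pre_match_variable string idx var_chars) := by unfold Pre_match_variable; infer_instance
def pvWitness_match_variable : String × Int × List String := ("ab1 ", 0, ["abc", "01"])

-- On negative idx where string[idx] starts like a variable, every character of the suffix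
-- string[idx:] is a var_chars character and string[0] is also one, A's helper wraps past the
-- end and re-reads the string from index 0, returning a name with duplicated wrapped characters
-- (e.g. ('ab', -1) ↦ (("variable","bab"),3)); B returns just the match in the suffix
-- ((("variable","b"),1)), the intended result of matching at position idx.
def D_match_variable (string : String) (idx : Int) (var_chars : List String) : Prop :=
  let s := string.toList
  let j := (idx + s.length).toNat
  idx < 0 ∧ -(s.length : Int) ≤ idx ∧
  "_abcdefghijklmnopqrstuvwxyzABCDEFGHIJKLMNOPQRSTUVWXYZ".toList.contains (s.getD j ' ') = true ∧
  (s.drop j ++ s.take 1).all (fun c => var_chars.any (fun vs => vs.toList.contains c)) = true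
instance (string : String) (idx : Int) (var_chars : List String) : Decidable (D_match_variable string idx var_chars) := by unfold D_match_variable; infer_instance

def Spec_match_variable (string : String) (idx : Int) (var_chars : List String) (out : (Option (String × String)) × Int) : Prop := ¬ D_match_variable string idx var_chars → out = match_variable_alt string idx var_chars
instance (string : String) (idx : Int) (var_chars : List String) (out : (Option (String × String)) × Int) : Decidable (Spec_match_variable string idx var_chars out) := by unfold Spec_match_variable; infer_instance

def pvDiffWitness_match_variable : String × Int × List String := ("ab", -1, ["ab"])
def pvDiffWitnessOut_match_variable : ((Option (String × String)) × Int) × ((Option (String × String)) × Int) :=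
  ((some ("variable", "bab"), 3), (some ("variable", "b"), 1))

-- ===== CLAIM =====
def Claim_unchanged_match_variable : Prop := ∀ (string : String) (idx : Int) (var_chars : List String), Dom_match_variable string idx var_chars → Pre_match_variable string idx var_chars → Spec_match_variable string idx var_chars (match_variable string idx var_chars)
def Claim_changed_match_variable : Prop := Dom_match_variable (pvDiffWitness_match_variable.1) (pvDiffWitness_match_variable.2.1) (pvDiffWitness_match_variable.2.2) ∧ Pre_match_variable (pvDiffWitness_match_variable.1) (pvDiffWitness_match_variable.2.1) (pvDiffWitness_match_variable.2.2) ∧ D_match_variable (pvDiffWitness_match_variable.1) (pvDiffWitness_match_variable.2.1) (pvDiffWitness_match_variable.2.2) ∧ match_variable (pvDiffWitness_match_variable.1) (pvDiffWitness_match_variable.2.1) (pvDiffWitness_match_variable.2.2) = pvDiffWitnessOut_match_variable.1 ∧ match_variable_alt (pvDiffWitness_match_variable.1) (pvDiffWitness_match_variable.2.1) (pvDiffWitness_match_variable.2.2) = pvDiffWitnessOut_match_variable.2 ∧ pvDiffWitnessOut_match_variable.1 ≠ pvDiffWitnessOut_match_variable.2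

-- ===== LEMMAS AND PROOFS =====

lemma any_contains_flatMap (vc : List String) (c : Char) :
    vc.any (fun vs => vs.toList.contains c) = (vc.flatMap String.toList).contains c := by
  rw [Bool.eq_iff_iff]
  simp [List.any_eq_true, List.mem_flatMap]

-- A's helper from a nonnegative index i computes takeAllowed of the suffix s.drop i.
lemma helper_nonneg (s : List Char) (vc : List String) :
    ∀ (k i : Nat), i + k = s.length → ∀ (name : List Char) (len : Int),
      matchVariableHelper s (i : Int) vc name len =
        (name ++ takeAllowed (vc.flatMap String.toList) (s.drop i),
         len + ((takeAllowed (vc.flatMap String.toList) (s.drop i)).length : Int)) := by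
  intro k
  induction k with
  | zero =>
    intro i hi name len
    rw [matchVariableHelper]
    rw [dif_pos (by omega : (i : Int) ≥ (s.length : Int))]
    have hd : s.drop i = [] := List.drop_eq_nil_of_le (by omega)
    simp [hd, takeAllowed]
  | succ k ih =>
    intro i hi name len
    have hlt : i < s.length := by omega
    rw [matchVariableHelper]
    rw [dif_neg (by omega)]
    simp only [PySem.List.pyGet?_natCast, List.getElem?_eq_getElem hlt]
    have hdrop : s.drop i = s[i] :: s.drop (i + 1) := List.drop_eq_getElem_cons hlt
    by_cases hc : vc.any (fun vs => vs.toList.contains s[i]) = true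
    · rw [if_pos hc]
      have hcast : ((i : Int) + 1) = ((i + 1 : Nat) : Int) := by push_cast; omega
      rw [hcast, ih (i + 1) (by omega)]
      have hc2 : (vc.flatMap String.toList).contains s[i] = true := by
        rw [← any_contains_flatMap]; exact hc
      rw [hdrop]
      simp only [takeAllowed, hc2, if_true, List.append_assoc, List.singleton_append,
        List.length_cons]
      refine Prod.ext rfl ?_
      push_cast; ring
    · rw [if_neg hc]
      rw [hdrop]
      simp [takeAllowed]
      simpa using hc

-- A's helper from a negative index i, when the scan does not wrap fully (¬ the D_ tail
-- condition), computes takeAllowed of the suffix s.drop (i + n).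
lemma helper_neg (s : List Char) (vc : List String) :
    ∀ (k : Nat) (i : Int), i = -((k : Int) + 1) → -(s.length : Int) ≤ i →
      (((s.drop (i + s.length).toNat).all (fun c => vc.any (fun vs => vs.toList.contains c)) &&
        vc.any (fun vs => vs.toList.contains (s.getD 0 ' '))) = false) →
      ∀ (name : List Char) (len : Int),
      matchVariableHelper s i vc name len =
        (name ++ takeAllowed (vc.flatMap String.toList) (s.drop (i + s.length).toNat),
         len + ((takeAllowed (vc.flatMap String.toList) (s.drop (i + s.length).toNat)).length : Int)) := by
  intro k
  induction k with
  | zero =>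
    intro i hi hlb hstop name len
    subst hi
    have hn : 1 ≤ s.length := by omega
    have hj : (-(((0:Nat):Int) + 1) + s.length).toNat = s.length - 1 := by omega
    rw [hj] at hstop ⊢
    have hjlt : s.length - 1 < s.length := by omega
    have hdrop : s.drop (s.length - 1) = [s[s.length - 1]] := by
      rw [List.drop_eq_getElem_cons hjlt]
      simp only [List.drop_eq_nil_of_le (by omega : s.length ≤ s.length - 1 + 1)]
    have hget : PySem.List.pyGet? s (-(((0:Nat):Int) + 1)) = some s[s.length - 1] := by
      have := PySem.List.pyGet?_neg_natCast (xs := s) (k := 1) (by omega) (by omega)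
      rw [List.getElem?_eq_getElem (by omega : s.length - 1 < s.length)] at this
      rw [show -(((0:Nat):Int) + 1) = -(((1:Nat):Int)) from by norm_num, this]
    rw [matchVariableHelper, dif_neg (by omega)]
    simp only [hget]
    by_cases hc : vc.any (fun vs => vs.toList.contains s[s.length - 1]) = true
    · rw [if_pos hc]
      -- the scan consumed the whole (one-character) suffix: hstop forces s[0] disallowed
      have hall : (s.drop (s.length - 1)).all (fun c => vc.any (fun vs => vs.toList.contains c)) = true := by
        rw [hdrop]; simpa using hc
      have h0 : vc.any (fun vs => vs.toList.contains (s.getD 0 ' ')) = false := by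
        rcases Bool.and_eq_false_iff.mp hstop with h | h
        · rw [h] at hall; exact absurd hall (by decide)
        · exact h
      have h0' : vc.any (fun vs => vs.toList.contains s[0]) = false := by
        rwa [List.getD_eq_getElem s ' ' (by omega)] at h0
      have hz : (-(((0:Nat):Int) + 1) + 1) = ((0:Nat) : Int) := by omega
      rw [hz, matchVariableHelper, dif_neg (by push_cast; omega)]
      simp only [PySem.List.pyGet?_natCast, List.getElem?_eq_getElem (by omega : 0 < s.length)]
      rw [if_neg (by simpa using h0')]
      have hc2 : (vc.flatMap String.toList).contains s[s.length - 1] = true := by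
        rw [← any_contains_flatMap]; exact hc
      rw [hdrop]
      simp only [takeAllowed, hc2, if_true, List.length_cons, List.length_nil]
      refine Prod.ext rfl ?_
      push_cast; ring
    · rw [if_neg hc]
      simp [hdrop, takeAllowed]
      simpa using hc
  | succ k ih =>
    intro i hi hlb hstop name len
    subst hi
    have hn : k + 2 ≤ s.length := by omega
    have hj : (-(((k+1:Nat):Int) + 1) + s.length).toNat = s.length - (k+2) := by
      push_cast
      omega
    rw [hj] at hstop ⊢
    have hjlt : s.length - (k+2) < s.length := by omega
    have hget : PySem.List.pyGet? s (-(((k+1:Nat):Int) + 1)) = some s[s.length - (k+2)] := by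
      have := PySem.List.pyGet?_neg_natCast (xs := s) (k := k+2) (by omega) (by omega)
      rw [List.getElem?_eq_getElem hjlt] at this
      rw [show -(((k+1:Nat):Int) + 1) = -(((k+2:Nat):Int)) from by push_cast; ring, this]
    have hdrop : s.drop (s.length - (k+2)) = s[s.length - (k+2)] :: s.drop (s.length - (k+1)) := by
      have h8 : s.length - (k+2) + 1 = s.length - (k+1) := by omega
      rw [List.drop_eq_getElem_cons hjlt, h8]
    rw [matchVariableHelper, dif_neg (by push_cast; omega)]
    simp only [hget]
    by_cases hc : vc.any (fun vs => vs.toList.contains s[s.length - (k+2)]) = true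
    · rw [if_pos hc]
      have hz : (-(((k+1:Nat):Int) + 1) + 1) = -(((k:Nat):Int) + 1) := by push_cast; omega
      have hj' : (-(((k:Nat):Int) + 1) + s.length).toNat = s.length - (k+1) := by
        omega
      have hstop' : (((s.drop (-(((k:Nat):Int) + 1) + s.length).toNat).all
            (fun c => vc.any (fun vs => vs.toList.contains c)) &&
          vc.any (fun vs => vs.toList.contains (s.getD 0 ' '))) = false) := by
        rw [hj']
        rw [hdrop] at hstop
        rcases Bool.and_eq_false_iff.mp hstop with h | h
        · simp only [List.all_cons, hc, Bool.true_and] at h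
          rw [h, Bool.false_and]
        · rw [h, Bool.and_false]
      rw [hz, ih (-(((k:Nat):Int) + 1)) rfl (by omega) hstop']
      rw [hj']
      have hc2 : (vc.flatMap String.toList).contains s[s.length - (k+2)] = true := by
        rw [← any_contains_flatMap]; exact hc
      rw [hdrop]
      simp only [takeAllowed, hc2, if_true, List.append_assoc, List.singleton_append,
        List.length_cons]
      refine Prod.ext rfl ?_
      push_cast; ring
    · rw [if_neg hc]
      simp [hdrop, takeAllowed]
      simpa using hc

-- the common tail of both ports, once A's helper result is known to be (T, |T|)
lemma tails_eq (T : List Char) :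
    (if (0 + (T.length : Int)) = 0 then ((none : Option (String × String)), (0:Int))
     else match PySem.List.pyGet? ([] ++ T) 0 with
       | none => (none, 0)
       | some v0 => if pvNUMERICAL.contains v0 then (none, 0)
           else (some ("variable", String.ofList ([] ++ T)), 0 + (T.length : Int)))
    = (match T with
       | [] => ((none : Option (String × String)), (0:Int))
       | n0 :: _ => if pvNUMERICAL.contains n0 then (none, 0)
           else (some ("variable", String.ofList T), (T.length : Int))) := by
  cases T with
  | nil => simp
  | cons a t =>
    rw [if_neg (by simp only [List.length_cons]; push_cast; omega)]
    simp only [List.nil_append, PySem.List.pyGet?_zero_cons, zero_add]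

-- ===== VERDICT =====
theorem match_variable_spec : Claim_unchanged_match_variable := by
  intro str idx vc _ hpre hnD
  obtain ⟨h1, h2⟩ := hpre
  show match_variable str idx vc = match_variable_alt str idx vc
  simp only [match_variable, match_variable_alt]
  by_cases hge : 0 ≤ idx
  · -- nonnegative idx: A never wraps; both scan s.drop idx
    have hjlt : idx.toNat < str.toList.length := by omega
    have hidx : idx = ((idx.toNat : Nat) : Int) := by omega
    rw [hidx]
    simp only [PySem.List.pyGet?_natCast, List.getElem?_eq_getElem hjlt,
      PySem.List.slice_from_natCast]
    rw [helper_nonneg str.toList vc (str.toList.length - idx.toNat) idx.toNat (by omega)]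
    by_cases hgu : pvUNDERSCORE.contains str.toList[idx.toNat] = false ∧
        pvALPHABETICAL.contains str.toList[idx.toNat] = false
    · rw [if_pos hgu, if_neg (by rw [hgu.1, hgu.2]; decide)]
    · have hor : (pvUNDERSCORE.contains str.toList[idx.toNat] ||
          pvALPHABETICAL.contains str.toList[idx.toNat]) = true := by
        cases hu : pvUNDERSCORE.contains str.toList[idx.toNat] with
        | true => simp
        | false =>
          cases ha : pvALPHABETICAL.contains str.toList[idx.toNat] with
          | true => simp
          | false => exact absurd ⟨hu, ha⟩ hgu
      rw [if_neg hgu, if_pos hor]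
      exact tails_eq _
  · -- negative idx: A reads s[idx + n]; outside D_ it stops within the suffix
    have hneg : idx < 0 := by omega
    have hn : 0 < str.toList.length := by omega
    set n := str.toList.length with hnn
    have hk : idx = -((((-idx - 1).toNat : Nat) : Int) + 1) := by omega
    have hjlt : (idx + n).toNat < n := by omega
    have hget : PySem.List.pyGet? str.toList idx = some str.toList[(idx + n).toNat] := by
      have h9 := PySem.List.pyGet?_neg_natCast (xs := str.toList) (k := (-idx).toNat)
        (by omega) (by omega)
      rw [List.getElem?_eq_getElem (by omega : str.toList.length - (-idx).toNat < str.toList.length)] at h9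
      have e2 : str.toList[(idx + (n:Int)).toNat] = str.toList[str.toList.length - (-idx).toNat] := by
        congr 1; omega
      rw [e2]
      conv_lhs => rw [show idx = -(((-idx).toNat : Nat) : Int) from by omega]
      exact h9
    have hslice : PySem.List.slice str.toList (some idx) none = str.toList.drop (idx + n).toNat := by
      have hcl : PySem.List.clampIdx str.toList.length idx = (idx + (n:Int)).toNat := by
        simp only [PySem.List.clampIdx]
        split_ifs <;> omega
      rw [PySem.List.slice_some_none, hcl]
    simp only [hget, hslice]
    by_cases hgu : pvUNDERSCORE.contains str.toList[(idx + n).toNat] = false ∧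
        pvALPHABETICAL.contains str.toList[(idx + n).toNat] = false
    · rw [if_pos hgu, if_neg (by rw [hgu.1, hgu.2]; decide)]
    · -- the guard passes, so ¬ D_ gives the no-full-wrap condition for helper_neg
      have hstop : (((str.toList.drop (idx + n).toNat).all
            (fun c => vc.any (fun vs => vs.toList.contains c)) &&
          vc.any (fun vs => vs.toList.contains (str.toList.getD 0 ' '))) = false) := by
        by_contra hb
        have hb' := Bool.and_eq_true_iff.mp (Bool.not_eq_false _ |>.mp hb)
        apply hnD
        unfold D_match_variable
        refine ⟨hneg, by omega, ?_, ?_⟩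
        · rw [List.getD_eq_getElem str.toList ' ' hjlt]
          rw [show ("_abcdefghijklmnopqrstuvwxyzABCDEFGHIJKLMNOPQRSTUVWXYZ".toList)
              = pvUNDERSCORE ++ pvALPHABETICAL from by decide]
          simp only [List.contains_append]
          by_contra hb2
          rcases Bool.or_eq_false_iff.mp (Bool.eq_false_iff.mpr hb2) with ⟨hu, ha⟩
          exact hgu ⟨hu, ha⟩
        · rw [List.all_append]
          have hb1 : (str.toList.drop (idx + (str.toList.length : Int)).toNat).all
              (fun c => vc.any (fun vs => vs.toList.contains c)) = true := hb'.1
          simp only [hb1, Bool.true_and]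
          cases hsl : str.toList with
          | nil =>
            exfalso
            have h0 : str.toList.length = 0 := by rw [hsl]; rfl
            omega
          | cons c t =>
            have hb2 := hb'.2
            rw [hsl] at hb2
            simpa using hb2
      rw [helper_neg str.toList vc ((-idx - 1).toNat) idx hk (by omega) hstop]
      have hor : (pvUNDERSCORE.contains str.toList[(idx + n).toNat] ||
          pvALPHABETICAL.contains str.toList[(idx + n).toNat]) = true := by
        cases hu : pvUNDERSCORE.contains str.toList[(idx + n).toNat] with
        | true => simp
        | false =>
          cases ha : pvALPHABETICAL.contains str.toList[(idx + n).toNat] with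
          | true => simp
          | false => exact absurd ⟨hu, ha⟩ hgu
      rw [if_neg hgu, if_pos hor]
      exact tails_eq _

theorem match_variable_changed : Claim_changed_match_variable := by
  unfold Claim_changed_match_variable
  refine ⟨by decide, by decide, by decide, ?_, by decide, by decide⟩
  show match_variable "ab" (-1) ["ab"] = (some ("variable", "bab"), 3)
  have e1 : PySem.List.pyGet? "ab".toList (-1) = some 'b' := by decide
  have e2 : PySem.List.pyGet? "ab".toList (-1 + 1) = some 'a' := by decide
  have e3 : PySem.List.pyGet? "ab".toList (-1 + 1 + 1) = some 'b' := by decide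
  have hv : matchVariableHelper "ab".toList (-1) ["ab"] [] 0 = (['b','a','b'], 3) := by
    rw [matchVariableHelper, dif_neg (by decide)]
    simp only [e1]
    rw [if_pos (by decide)]
    rw [matchVariableHelper, dif_neg (by decide)]
    simp only [e2]
    rw [if_pos (by decide)]
    rw [matchVariableHelper, dif_neg (by decide)]
    simp only [e3]
    rw [if_pos (by decide)]
    rw [matchVariableHelper, dif_pos (by decide)]
    decide
  simp only [match_variable, e1, hv]
  decide
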